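-- pv_equiv track=rewrite | github.com/jra419/NetBeacon | model_generation/tree_to_table/utils.py | range_to_ternary
-- ===== SOURCE A (Python) =====
-- def find_next_split(minz, maxz):
--     count = 0
--
--     while (minz >> count) & 1 == 0 and (minz + (1 << count)) < maxz:
--         count += 1
--
--     if (minz + ( 1 << count)) > maxz:
--         return 1 << (count - 1)
--
--     return 1 << count
--
-- def range_to_ternary(minz, maxz):
--     if maxz <= minz:
--         return [[], []]
--
--     start_num = []
--     bcount = []
--
--     while True:
--         a = find_next_split(minz, maxz)
--         start_num.append(minz)
--         bcount.append(a)
--         if minz + a == maxz: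
--             break
--         minz += a
--
--     return start_num, bcount
-- ===== SOURCE B (Python) =====
-- def range_to_ternary(minz, maxz):
--     if maxz <= minz:
--         return [[], []]
--     start_num = []
--     bcount = []
--     while minz < maxz:
--         remaining = maxz - minz
--         P = 1 << (remaining.bit_length() - 1)   # largest power of two <= remaining
--         align = minz & -minz                    # largest power of two dividing minz (0 if minz == 0)
--         a = P if align == 0 or align > P else align
--         start_num.append(minz)
--         bcount.append(a)
--         minz += a
--     return start_num, bcount
-- ===== Notes on version B (the rewrite author's own statement) =====
-- stated objective: alternative
-- what changed: A's helper scans bits one by one (incrementing count while the bit is zero and the block fits) to find each block size; B computes the block size in closed form per iteration as min(lowbit(minz), largest power of two <= maxz-minz) via bit_length and minz & -minz, folded into a single while-loop with no helper.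
import Mathlib
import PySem

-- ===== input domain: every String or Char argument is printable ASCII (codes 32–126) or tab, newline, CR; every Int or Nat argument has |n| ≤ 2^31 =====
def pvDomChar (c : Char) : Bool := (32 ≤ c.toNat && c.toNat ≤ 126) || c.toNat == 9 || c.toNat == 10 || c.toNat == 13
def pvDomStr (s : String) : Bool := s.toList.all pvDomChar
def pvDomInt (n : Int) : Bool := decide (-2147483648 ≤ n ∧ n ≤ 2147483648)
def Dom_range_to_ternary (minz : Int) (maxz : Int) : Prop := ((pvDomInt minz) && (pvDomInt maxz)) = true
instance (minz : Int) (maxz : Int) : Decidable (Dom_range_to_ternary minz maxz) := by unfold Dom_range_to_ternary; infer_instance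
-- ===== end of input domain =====

-- B replaces A's per-step bit-by-bit while-scan by a closed-form block size
-- (bit_length / lowbit arithmetic) and folds the helper into a single while-loop.
-- The `fuel` parameters below are totality guards only: each loop is entered with
-- enough fuel to run to its Python exit condition (proved by the lemmas below).

-- ===== PORT A =====
-- the inner `while (minz >> count) & 1 == 0 and (minz + (1 << count)) < maxz: count += 1`
def fns_loop (minz maxz : Int) (count : Nat) : Nat → Nat
  | 0 => count
  | fuel+1 =>
    if PySem.Int.band (minz >>> count) 1 = 0 ∧ minz + ((1:Int) <<< count) < maxz then
      fns_loop minz maxz (count + 1) fuel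
    else count

def find_next_split (minz maxz : Int) : Int :=
  let count := fns_loop minz maxz 0 (maxz - minz).toNat
  if maxz < minz + ((1:Int) <<< count) then (1:Int) <<< (count - 1)
  else (1:Int) <<< count

-- the outer `while True: … append … if minz + a == maxz: break; minz += a`
def rtt_loop (minz maxz : Int) (start_num bcount : List Int) : Nat → List Int × List Int
  | 0 => (start_num, bcount)
  | fuel+1 =>
    let a := find_next_split minz maxz
    if minz + a = maxz then (start_num ++ [minz], bcount ++ [a])
    else rtt_loop (minz + a) maxz (start_num ++ [minz]) (bcount ++ [a]) fuel

def range_to_ternary (minz : Int) (maxz : Int) : List Int × List Int :=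
  if maxz ≤ minz then ([], []) else rtt_loop minz maxz [] [] (maxz - minz).toNat

-- ===== PORT B =====
-- the single `while minz < maxz` loop of Source B, block size in closed form
def alt_loop (minz maxz : Int) (start_num bcount : List Int) : Nat → List Int × List Int
  | 0 => (start_num, bcount)
  | fuel+1 =>
    if minz < maxz then
      let remaining := maxz - minz
      let P : Int := (1:Int) <<< (PySem.Int.bitLength remaining - 1)
      let align : Int := PySem.Int.band minz (-minz)
      let a : Int := if align = 0 ∨ P < align then P else align
      alt_loop (minz + a) maxz (start_num ++ [minz]) (bcount ++ [a]) fuel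
    else (start_num, bcount)

def range_to_ternary_alt (minz : Int) (maxz : Int) : List Int × List Int :=
  if maxz ≤ minz then ([], []) else alt_loop minz maxz [] [] (maxz - minz).toNat

-- ===== PRECONDITION & SPEC =====
def Spec_range_to_ternary (minz : Int) (maxz : Int) (out : List Int × List Int) : Prop := out = range_to_ternary_alt minz maxz
instance (minz : Int) (maxz : Int) (out : List Int × List Int) : Decidable (Spec_range_to_ternary minz maxz out) := by unfold Spec_range_to_ternary; infer_instance

-- ===== CLAIM (what is proved, stated in full; the proofs are below) =====
def Claim_equal_range_to_ternary : Prop := ∀ (minz : Int) (maxz : Int), Dom_range_to_ternary minz maxz → Spec_range_to_ternary minz maxz (range_to_ternary minz maxz)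

-- ===== LEMMAS AND PROOFS =====

theorem one_shl (c : Nat) : (1:Int) <<< c = 2 ^ c := by
  simpa using Int.shiftLeft_eq (1:Int) c

-- Nat-level lowbit facts feeding band_neg_self_lowbit
theorem and_pred_odd (n : ℕ) (h : n % 2 = 1) : n &&& (n - 1) = n - 1 := by
  apply Nat.eq_of_testBit_eq
  intro i
  rw [Nat.testBit_and]
  cases i with
  | zero =>
    have h1 : (n - 1) % 2 = 0 := by omega
    simp [Nat.testBit_zero, h1]
  | succ i =>
    have h2 : n / 2 = (n - 1) / 2 := by omega
    rw [Nat.testBit_add_one, Nat.testBit_add_one, h2, Bool.and_self]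

theorem and_pred_even (m : ℕ) (h : 0 < m) : (2*m) &&& (2*m - 1) = 2 * (m &&& (m - 1)) := by
  apply Nat.eq_of_testBit_eq
  intro i
  rw [Nat.testBit_and]
  cases i with
  | zero =>
    have h1 : (2*m) % 2 = 0 := by omega
    have h2 : (2 * (m &&& (m-1))) % 2 = 0 := by omega
    simp [Nat.testBit_zero, h1, h2]
  | succ i =>
    have h1 : (2*m) / 2 = m := by omega
    have h2 : (2*m - 1) / 2 = m - 1 := by omega
    have h3 : (2 * (m &&& (m-1))) / 2 = m &&& (m-1) := by omega
    rw [Nat.testBit_add_one, Nat.testBit_add_one, Nat.testBit_add_one, h1, h2, h3, Nat.testBit_and]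

theorem nat_lowbit (n : ℕ) (h : 0 < n) :
    ∃ t, n - (n &&& (n-1)) = 2^t ∧ 2^t ∣ n ∧ ¬ 2^(t+1) ∣ n := by
  induction n using Nat.strong_induction_on with
  | _ n ih =>
    rcases Nat.even_or_odd n with he | ho
    · obtain ⟨m, hm⟩ := he
      have hm2 : n = 2 * m := by omega
      have hmpos : 0 < m := by omega
      obtain ⟨t, ht1, ht2, ht3⟩ := ih m (by omega) hmpos
      have hand : m &&& (m-1) ≤ m := Nat.and_le_left
      refine ⟨t+1, ?_, ?_, ?_⟩
      · rw [hm2, and_pred_even m hmpos, pow_succ]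
        omega
      · rw [hm2, pow_succ, Nat.mul_comm (2^t) 2]
        exact Nat.mul_dvd_mul_left 2 ht2
      · intro hd
        apply ht3
        rw [hm2, pow_succ, pow_succ, Nat.mul_comm (2^t * 2) 2] at hd
        exact (Nat.mul_dvd_mul_iff_left (by norm_num : 0 < 2)).mp (by
          rw [pow_succ]; exact hd)
    · have ho2 : n % 2 = 1 := Nat.odd_iff.mp ho
      refine ⟨0, ?_, one_dvd n, ?_⟩
      · rw [and_pred_odd n ho2]
        omega
      · intro hd
        rw [pow_one] at hd
        omega

-- `minz & -minz` is a positive power of two dividing minz (and the largest such), for minz ≠ 0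
theorem band_neg_self_lowbit (m : Int) (h : m ≠ 0) :
    ∃ t : ℕ, PySem.Int.band m (-m) = 2 ^ t ∧ ((2:Int) ^ t ∣ m) ∧ ¬ ((2:Int) ^ (t+1) ∣ m) := by
  have key : ∀ n : ℕ, 0 < n → ∀ t : ℕ, 2^t ∣ n → ¬ 2^(t+1) ∣ n →
      (((2:Int) ^ t ∣ (n:Int)) ∧ ¬ ((2:Int) ^ (t+1) ∣ (n:Int))) := by
    intro n hn t h1 h2
    constructor
    · exact_mod_cast Int.natCast_dvd_natCast.mpr h1
    · intro hd
      exact h2 (by exact_mod_cast hd)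
  rcases lt_trichotomy m 0 with hneg | rfl | hpos
  · set n := (-m).toNat with hn
    have hn1 : 0 < n := by omega
    obtain ⟨t, h1, h2, h3⟩ := nat_lowbit n hn1
    have e1 : ¬ (0 ≤ m) := by omega
    have e2 : (0:Int) ≤ -m := by omega
    refine ⟨t, ?_, ?_, ?_⟩
    · simp only [PySem.Int.band]
      rw [if_neg e1, if_pos e2]
      have e3 : (-m - 1).toNat = n - 1 := by omega
      have e4 : (-m).toNat = n := by omega
      rw [e3, e4, h1]
      push_cast
      ring
    · rw [← Int.dvd_neg]
      have e5 : -m = (n:Int) := by omega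
      rw [e5]
      exact ((key n hn1 t h2 h3).1)
    · rw [← Int.dvd_neg]
      have e5 : -m = (n:Int) := by omega
      rw [e5]
      exact ((key n hn1 t h2 h3).2)
  · exact absurd rfl h
  · set n := m.toNat with hn
    have hn1 : 0 < n := by omega
    obtain ⟨t, h1, h2, h3⟩ := nat_lowbit n hn1
    have e1 : (0:Int) ≤ m := by omega
    have e2 : ¬ ((0:Int) ≤ -m) := by omega
    refine ⟨t, ?_, ?_, ?_⟩
    · simp only [PySem.Int.band]
      rw [if_pos e1, if_neg e2]
      have e3 : (-(-m) - 1).toNat = n - 1 := by omega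
      rw [e3, ← hn, h1]
      push_cast
      ring
    · have e5 : m = (n:Int) := by omega
      rw [e5]
      exact ((key n hn1 t h2 h3).1)
    · have e5 : m = (n:Int) := by omega
      rw [e5]
      exact ((key n hn1 t h2 h3).2)

-- the loop condition's bit test, under the loop's divisibility invariant
theorem bit_test (m : Int) (c : Nat) (hd : (2:Int) ^ c ∣ m) :
    (PySem.Int.band (m >>> c) 1 = 0) ↔ ((2:Int) ^ (c+1) ∣ m) := by
  obtain ⟨q, hq⟩ := hd
  have hshift : m >>> c = q := by
    rw [hq, Int.shiftRight_eq_div_pow]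
    exact Int.mul_ediv_cancel_left q (by positivity)
  rw [hshift, PySem.Int.band_one, PySem.Int.mod_eq_zero_iff_dvd]
  constructor
  · rintro ⟨u, hu⟩
    exact ⟨u, by rw [hq, hu, pow_succ]; ring⟩
  · rintro ⟨u, hu⟩
    refine ⟨u, ?_⟩
    have h2 : (2:Int) ^ c ≠ 0 := by positivity
    have h3 : (2:Int) ^ c * q = 2 ^ c * (2 * u) := by rw [← hq, hu, pow_succ]; ring
    exact mul_left_cancel₀ h2 h3

theorem cond_lt (minz maxz : Int) (k : Nat) (h : minz + ((1:Int) <<< k) < maxz) :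
    k < (maxz - minz).toNat := by
  have h1 : (1:Int) <<< k = 2 ^ k := one_shl k
  have h2 : (k : Int) < 2 ^ k := by exact_mod_cast Nat.lt_two_pow_self (n := k)
  omega

theorem fns_loop_spec_fuel (minz maxz : Int) :
    ∀ (fuel k : Nat), (maxz - minz).toNat - k ≤ fuel →
    k ≤ fns_loop minz maxz k fuel ∧
    ¬(PySem.Int.band (minz >>> fns_loop minz maxz k fuel) 1 = 0 ∧
      minz + ((1:Int) <<< fns_loop minz maxz k fuel) < maxz) ∧
    ∀ j, k ≤ j → j < fns_loop minz maxz k fuel →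
      (PySem.Int.band (minz >>> j) 1 = 0 ∧ minz + ((1:Int) <<< j) < maxz) := by
  intro fuel
  induction fuel with
  | zero =>
    intro k hk
    by_cases hcond : PySem.Int.band (minz >>> k) 1 = 0 ∧ minz + ((1:Int) <<< k) < maxz
    · exact absurd hk (by have := cond_lt minz maxz k hcond.2; omega)
    · simp only [fns_loop]
      exact ⟨le_rfl, hcond, fun j h1 h2 => by omega⟩
  | succ fuel ih =>
    intro k hk
    by_cases hcond : PySem.Int.band (minz >>> k) 1 = 0 ∧ minz + ((1:Int) <<< k) < maxz
    · have hE : fns_loop minz maxz k (fuel+1) = fns_loop minz maxz (k+1) fuel := by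
        simp only [fns_loop]
        rw [if_pos hcond]
      have hk1 : (maxz - minz).toNat - (k+1) ≤ fuel := by
        have := cond_lt minz maxz k hcond.2; omega
      obtain ⟨h1, h2, h3⟩ := ih (k+1) hk1
      rw [hE]
      refine ⟨by omega, h2, ?_⟩
      intro j hj1 hj2
      rcases eq_or_lt_of_le hj1 with rfl | hlt
      · exact hcond
      · exact h3 j (by omega) hj2
    · have hE : fns_loop minz maxz k (fuel+1) = k := by
        simp only [fns_loop]
        rw [if_neg hcond]
      rw [hE]
      exact ⟨le_rfl, hcond, fun j h1 h2 => by omega⟩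

theorem fns_loop_spec (minz maxz : Int) :
    0 ≤ fns_loop minz maxz 0 (maxz - minz).toNat ∧
    ¬(PySem.Int.band (minz >>> fns_loop minz maxz 0 (maxz - minz).toNat) 1 = 0 ∧
      minz + ((1:Int) <<< fns_loop minz maxz 0 (maxz - minz).toNat) < maxz) ∧
    ∀ j, 0 ≤ j → j < fns_loop minz maxz 0 (maxz - minz).toNat →
      (PySem.Int.band (minz >>> j) 1 = 0 ∧ minz + ((1:Int) <<< j) < maxz) :=
  fns_loop_spec_fuel minz maxz (maxz - minz).toNat 0 (by omega)

theorem fns_dvd (minz maxz : Int) : ∀ (c : Nat), c ≤ fns_loop minz maxz 0 (maxz - minz).toNat →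
    (2:Int) ^ c ∣ minz := by
  intro c
  induction c with
  | zero => intro _; simp
  | succ c ih =>
    intro hc
    have hdc := ih (by omega)
    have hcond := (fns_loop_spec minz maxz).2.2 c (Nat.zero_le c) (by omega)
    exact (bit_test minz c hdc).mp hcond.1

theorem pow_le_of_le {a b : Nat} (h : a ≤ b) : (2:Int) ^ a ≤ 2 ^ b :=
  pow_le_pow_right₀ (by norm_num) h

theorem pow_lt_of_lt {a b : Nat} (h : a < b) : (2:Int) ^ a < 2 ^ b :=
  pow_lt_pow_right₀ (by norm_num) h

theorem lt_of_pow_lt {a b : Nat} (h : (2:Int) ^ a < 2 ^ b) : a < b := by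
  by_contra hc
  have := pow_le_of_le (show b ≤ a by omega)
  omega

theorem pow_bracket_eq (x : Int) (a b : Nat) (h1 : (2:Int) ^ a ≤ x) (h2 : x < 2 ^ (a+1))
    (h3 : (2:Int) ^ b ≤ x) (h4 : x < 2 ^ (b+1)) : a = b := by
  by_contra hne
  rcases Nat.lt_or_ge a b with hab | hab
  · have := pow_le_of_le (show a + 1 ≤ b by omega)
    omega
  · have := pow_le_of_le (show b + 1 ≤ a by omega)
    omega

-- per-step equality: A's scanned block size = B's closed-form block size
theorem step_eq (minz maxz : Int) (h : minz < maxz) :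
    find_next_split minz maxz =
      (if PySem.Int.band minz (-minz) = 0 ∨
          (1:Int) <<< (PySem.Int.bitLength (maxz - minz) - 1) < PySem.Int.band minz (-minz)
       then (1:Int) <<< (PySem.Int.bitLength (maxz - minz) - 1)
       else PySem.Int.band minz (-minz)) := by
  simp only [find_next_split]
  have hr : (0:Int) < maxz - minz := by omega
  set c0 := fns_loop minz maxz 0 (maxz - minz).toNat with hc0rev
  set B := PySem.Int.bitLength (maxz - minz) with hBrev
  obtain ⟨-, hstop, hbelow⟩ := fns_loop_spec minz maxz
  rw [← hc0rev] at hstop hbelow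
  simp only [one_shl] at hstop hbelow ⊢
  have hub : maxz - minz < (2:Int) ^ B := by
    have h1 := PySem.Int.lt_two_pow_bitLength (maxz - minz)
    rw [← Int.natAbs_of_nonneg (le_of_lt hr)]
    exact_mod_cast h1
  have hlb : (2:Int) ^ (B-1) ≤ maxz - minz := by
    have h1 := PySem.Int.two_pow_bitLength_le (maxz - minz) (by omega)
    rw [← Int.natAbs_of_nonneg (le_of_lt hr)]
    exact_mod_cast h1
  have hB1 : 1 ≤ B := by
    by_contra h0
    have hB0 : B = 0 := by omega
    rw [hB0, pow_zero] at hub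
    omega
  have hBsucc : B - 1 + 1 = B := by omega
  have hdvd : (2:Int) ^ c0 ∣ minz := fns_dvd minz maxz c0 le_rfl
  have hbelow' : ∀ j, j < c0 → ((2:Int) ^ (j+1) ∣ minz ∧ (2:Int) ^ j < maxz - minz) := by
    intro j hj
    have hdj : (2:Int) ^ j ∣ minz := fns_dvd minz maxz j (by omega)
    obtain ⟨hb1, hb2⟩ := hbelow j (Nat.zero_le j) hj
    exact ⟨(bit_test minz j hdj).mp hb1, by omega⟩
  have hstop' : ¬ ((2:Int) ^ (c0+1) ∣ minz ∧ (2:Int) ^ c0 < maxz - minz) := by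
    rintro ⟨hs1, hs2⟩
    exact hstop ⟨(bit_test minz c0 hdvd).mpr hs1, by omega⟩
  by_cases hm : minz = 0
  · subst hm
    have hal : PySem.Int.band 0 (-0) = 0 := by decide
    rw [if_pos (Or.inl hal)]
    have hs : ¬ ((2:Int) ^ c0 < maxz - 0) := fun hh => hstop' ⟨dvd_zero _, hh⟩
    have hp : (0:Int) < 2 ^ c0 := by positivity
    split_ifs with hA
    · have hc01 : 1 ≤ c0 := by
        by_contra h0
        have hc00 : c0 = 0 := by omega
        rw [hc00, pow_zero] at hA
        omega
      have hbel := (hbelow' (c0-1) (by omega)).2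
      have e : c0 - 1 + 1 = c0 := by omega
      have hBb : B - 1 = c0 - 1 :=
        pow_bracket_eq (maxz - 0) (B-1) (c0-1) (by simpa using hlb) (by rw [hBsucc]; simpa using hub)
          (le_of_lt hbel) (by rw [e]; omega)
      rw [hBb]
    · have heq : (2:Int) ^ c0 = maxz - 0 := by omega
      have hBb : B - 1 = c0 :=
        pow_bracket_eq (maxz - 0) (B-1) c0 (by simpa using hlb) (by rw [hBsucc]; simpa using hub)
          (by omega) (by rw [pow_succ]; omega)
      rw [hBb, heq]
  · obtain ⟨t, ht, ht1, ht2⟩ := band_neg_self_lowbit minz hm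
    have hdvd_iff : ∀ k : Nat, ((2:Int) ^ k ∣ minz ↔ k ≤ t) := by
      intro k
      constructor
      · intro hk
        by_contra hkt
        exact ht2 (dvd_trans (pow_dvd_pow 2 (by omega)) hk)
      · intro hk
        exact dvd_trans (pow_dvd_pow 2 hk) ht1
    have hct : c0 ≤ t := (hdvd_iff c0).mp hdvd
    rw [ht]
    have htpos : (0:Int) < 2 ^ t := by positivity
    by_cases hA : maxz < minz + (2:Int) ^ c0
    · rw [if_pos hA]
      have hc01 : 1 ≤ c0 := by
        by_contra h0
        have hc00 : c0 = 0 := by omega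
        rw [hc00, pow_zero] at hA
        omega
      obtain ⟨-, hlt1⟩ := hbelow' (c0-1) (by omega)
      have e : c0 - 1 + 1 = c0 := by omega
      have hBb : B - 1 = c0 - 1 :=
        pow_bracket_eq (maxz - minz) (B-1) (c0-1) hlb (by rw [hBsucc]; exact hub)
          (le_of_lt hlt1) (by rw [e]; omega)
      have hcond : (2:Int) ^ (B-1) < 2 ^ t := by
        rw [hBb]
        exact pow_lt_of_lt (by omega)
      rw [if_pos (Or.inr hcond), hBb]
    · rw [if_neg hA]
      have hle : (2:Int) ^ c0 ≤ maxz - minz := by omega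
      by_cases hceq : c0 = t
      · have htB : t < B := lt_of_pow_lt (lt_of_le_of_lt (by rw [← hceq] at *; exact hle) hub)
        have hle2 : (2:Int) ^ t ≤ 2 ^ (B-1) := pow_le_of_le (by omega)
        rw [if_neg (by
          rintro (h0 | h0)
          · omega
          · omega), hceq]
      · have hclt : c0 < t := by omega
        have hd2 : (2:Int) ^ (c0+1) ∣ minz := (hdvd_iff (c0+1)).mpr (by omega)
        have hnr : ¬ ((2:Int) ^ c0 < maxz - minz) := fun hh => hstop' ⟨hd2, hh⟩
        have heq : (2:Int) ^ c0 = maxz - minz := by omega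
        have hp : (0:Int) < 2 ^ c0 := by positivity
        have hBb : B - 1 = c0 :=
          pow_bracket_eq (maxz - minz) (B-1) c0 hlb (by rw [hBsucc]; exact hub)
            (by omega) (by rw [pow_succ]; omega)
        have hcond : (2:Int) ^ (B-1) < 2 ^ t := by
          rw [hBb]
          exact pow_lt_of_lt hclt
        rw [if_pos (Or.inr hcond), hBb]

theorem step_bounds (minz maxz : Int) (h : minz < maxz) :
    1 ≤ find_next_split minz maxz ∧ minz + find_next_split minz maxz ≤ maxz := by
  rw [step_eq minz maxz h]
  have hr : (0:Int) < maxz - minz := by omega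
  set B := PySem.Int.bitLength (maxz - minz) with hBrev
  have hlb : (2:Int) ^ (B-1) ≤ maxz - minz := by
    have h1 := PySem.Int.two_pow_bitLength_le (maxz - minz) (by omega)
    rw [← Int.natAbs_of_nonneg (le_of_lt hr)]
    exact_mod_cast h1
  rw [one_shl]
  have hp : (0:Int) < 2 ^ (B-1) := by positivity
  split_ifs with hc
  · omega
  · rw [not_or] at hc
    have hm : minz ≠ 0 := fun h0 => hc.1 (by simp [h0])
    obtain ⟨t, ht, -, -⟩ := band_neg_self_lowbit minz hm
    have hpos : (0:Int) < PySem.Int.band minz (-minz) := by rw [ht]; positivity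
    omega

theorem alt_loop_stop (minz maxz : Int) (sn bc : List Int) (fuel : Nat) (h : ¬ minz < maxz) :
    alt_loop minz maxz sn bc fuel = (sn, bc) := by
  cases fuel with
  | zero => simp only [alt_loop]
  | succ fuel =>
    simp only [alt_loop]
    rw [if_neg h]

theorem loop_eq (N : Nat) : ∀ (minz maxz : Int) (sn bc : List Int),
    (maxz - minz).toNat ≤ N → minz < maxz →
    rtt_loop minz maxz sn bc N = alt_loop minz maxz sn bc N := by
  induction N with
  | zero =>
    intro minz maxz sn bc hN h
    omega
  | succ N ih =>
    intro minz maxz sn bc hN h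
    have hstep := step_eq minz maxz h
    have hbnd := step_bounds minz maxz h
    simp only [rtt_loop, alt_loop]
    rw [if_pos h]
    simp only [← hstep]
    by_cases hend : minz + find_next_split minz maxz = maxz
    · rw [if_pos hend, hend, alt_loop_stop maxz maxz _ _ N (lt_irrefl maxz)]
    · rw [if_neg hend]
      exact ih (minz + find_next_split minz maxz) maxz _ _ (by omega) (by omega)

-- ===== VERDICT (by name: the statement is the Claim_ definition above) =====
theorem range_to_ternary_spec : Claim_equal_range_to_ternary := by
  intro minz maxz _
  unfold Spec_range_to_ternary range_to_ternary range_to_ternary_alt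
  by_cases hle : maxz ≤ minz
  · simp [hle]
  · simp only [if_neg hle]
    exact loop_eq (maxz - minz).toNat minz maxz [] [] le_rfl (by omega)
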